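-- pv_equiv track=rewrite | github.com/hcwong/cs3245hw4 | index.py | generate_positional_indexes_from_list
-- ===== SOURCE A (Python) =====
-- from collections import Counter, defaultdict
--
-- def generate_positional_indexes_from_list(words, start_index):
--     """
--     Generate the positional indexes for the phrasal queries from a list of words
--     Positions are stored via gap encoding, so only the first position is the absolute position
--     Subsequent positions are obtained via addition from the previous
--     """
--     positions = defaultdict(list)
--     last_position = {}
--     for i in range(start_index, len(words)):
--         word = words[i]
--         # Store gap encoding
--         if word not in last_position:
--             last_position[word] = i
--             positions[word].append(i)
--         else:
--             positions[word].append(i - last_position[word])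
--             last_position[word] = i
--     return positions
-- ===== SOURCE B (Python) =====
-- from collections import defaultdict
--
-- def generate_positional_indexes_from_list(words, start_index):
--     """Two-pass version: group absolute positions per word, then gap-encode each list in place."""
--     positions = defaultdict(list)
--     for i in range(start_index, len(words)):
--         positions[words[i]].append(i)
--     for ps in positions.values():
--         ps[1:] = [b - a for a, b in zip(ps, ps[1:])]
--     return positions
-- ===== Notes on version B (the rewrite author's own statement) =====
-- stated objective: alternative
-- what changed: Replaces the single-pass fold that maintains a running last_position map with a two-phase algorithm: first group plain absolute positions per word, then gap-encode each list with a zip-based differencing pass.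
import Mathlib
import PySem

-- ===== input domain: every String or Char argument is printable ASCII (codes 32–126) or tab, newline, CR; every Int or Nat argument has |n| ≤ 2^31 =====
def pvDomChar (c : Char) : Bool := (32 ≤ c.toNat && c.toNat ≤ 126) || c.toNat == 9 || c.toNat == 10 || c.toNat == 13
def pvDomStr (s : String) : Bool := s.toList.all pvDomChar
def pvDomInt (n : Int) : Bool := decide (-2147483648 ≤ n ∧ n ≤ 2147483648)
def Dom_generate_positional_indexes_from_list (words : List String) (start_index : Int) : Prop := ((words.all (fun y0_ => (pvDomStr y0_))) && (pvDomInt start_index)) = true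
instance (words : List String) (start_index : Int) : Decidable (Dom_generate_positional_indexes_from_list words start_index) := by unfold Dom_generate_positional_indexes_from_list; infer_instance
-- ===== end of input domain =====

-- B replaces A's single-pass fold with a running last-position map by a grouping pass
-- building absolute-position lists followed by a zip-based differencing pass (alternative
-- decomposition, same cost). Pre_ excludes start_index < -len(words), where A raises IndexError.


-- ===== PORT A =====
-- one loop iteration of A: positions/last_position updates for index i
def pvStepA (words : List String)
    (st : PySem.Dict String (List Int) × PySem.Dict String Int) (i : Int) :
    PySem.Dict String (List Int) × PySem.Dict String Int :=
  match PySem.List.pyGet? words i with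
  | none => st  -- IndexError in Python; unreachable under Pre_
  | some word =>
    if st.2.contains word = false then
      (st.1.insert word (st.1.getD word [] ++ [i]), st.2.insert word i)
    else
      (st.1.insert word (st.1.getD word [] ++ [i - st.2.getD word 0]), st.2.insert word i)

def generate_positional_indexes_from_list (words : List String) (start_index : Int) : List (String × List Int) :=
  let st := (PySem.List.pyRange start_index words.length 1).foldl (pvStepA words)
    (PySem.Dict.empty, PySem.Dict.empty)
  st.1.items

-- ===== PORT B =====
-- one grouping iteration of B: append absolute position i to its word's list
def pvStepB (words : List String)
    (d : PySem.Dict String (List Int)) (i : Int) : PySem.Dict String (List Int) :=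
  match PySem.List.pyGet? words i with
  | none => d  -- IndexError in Python; unreachable under Pre_
  | some word => d.insert word (d.getD word [] ++ [i])

-- ps[1:] = [b - a for a, b in zip(ps, ps[1:])]
def pvGapEncode (ps : List Int) : List Int :=
  match ps with
  | [] => []
  | p :: rest => p :: List.zipWith (fun a b => b - a) (p :: rest) rest

def generate_positional_indexes_from_list_alt (words : List String) (start_index : Int) : List (String × List Int) :=
  let positions := (PySem.List.pyRange start_index words.length 1).foldl (pvStepB words)
    PySem.Dict.empty
  positions.items.map (fun p => (p.1, pvGapEncode p.2))

-- ===== PRECONDITION & SPEC =====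
-- Pre_ excludes exactly start_index < -len(words): there range() yields a negative index
-- below -len(words) and words[i] raises IndexError in A (and in B).
def Pre_generate_positional_indexes_from_list (words : List String) (start_index : Int) : Prop :=
  -(words.length : Int) ≤ start_index
instance (words : List String) (start_index : Int) : Decidable (Pre_generate_positional_indexes_from_list words start_index) := by unfold Pre_generate_positional_indexes_from_list; infer_instance

def pvWitness_generate_positional_indexes_from_list : List String × Int := (["a", "b", "a"], 0)

def Spec_generate_positional_indexes_from_list (words : List String) (start_index : Int) (out : List (String × List Int)) : Prop := out = generate_positional_indexes_from_list_alt words start_index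
instance (words : List String) (start_index : Int) (out : List (String × List Int)) : Decidable (Spec_generate_positional_indexes_from_list words start_index out) := by unfold Spec_generate_positional_indexes_from_list; infer_instance

-- ===== CLAIM (what is proved, stated in full; the proofs are below) =====
def Claim_equal_generate_positional_indexes_from_list : Prop := ∀ (words : List String) (start_index : Int), Dom_generate_positional_indexes_from_list words start_index → Pre_generate_positional_indexes_from_list words start_index → Spec_generate_positional_indexes_from_list words start_index (generate_positional_indexes_from_list words start_index)

-- ===== LEMMAS AND PROOFS =====

-- gap-encoding one more absolute position appends one more gap
lemma pvZip_append (ps : List Int) (p i : Int) :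
    List.zipWith (fun a b => b - a) (p :: ps ++ [i]) (ps ++ [i])
      = List.zipWith (fun a b => b - a) (p :: ps) ps ++ [i - (p :: ps).getLast?.getD 0] := by
  induction ps generalizing p with
  | nil => simp
  | cons q qs ih =>
    simp only [List.cons_append, List.zipWith_cons_cons, List.getLast?_cons_cons]
    exact congrArg _ (ih q)

lemma pvGapEncode_append (ps : List Int) (i : Int) (h : ps ≠ []) :
    pvGapEncode (ps ++ [i]) = pvGapEncode ps ++ [i - ps.getLast?.getD 0] := by
  cases ps with
  | nil => exact absurd rfl h
  | cons p rest =>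
    simp only [List.cons_append, pvGapEncode]
    exact congrArg _ (pvZip_append rest p i)

-- the invariant transfer: A's positions dict is B's dict with every value gap-encoded,
-- and A's last_position is the last absolute position of B's list
lemma pv_keys_eq (posA posB : PySem.Dict String (List Int))
    (h : posA.items = posB.items.map (fun p => (p.1, pvGapEncode p.2))) :
    posA.keys = posB.keys := by
  simp only [PySem.Dict.keys, h, List.map_map]
  rfl

lemma pv_getD_transfer (posA posB : PySem.Dict String (List Int)) (w : String)
    (h : posA.items = posB.items.map (fun p => (p.1, pvGapEncode p.2)))
    (hnd : posB.keys.Nodup) :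
    posA.getD w [] = pvGapEncode (posB.getD w []) := by
  have hndA : posA.keys.Nodup := by rw [pv_keys_eq posA posB h]; exact hnd
  cases hc : posB.get? w with
  | none =>
    have hk : w ∉ posB.keys := (PySem.Dict.get?_eq_none_iff_not_mem_keys _ _).1 hc
    have hkA : w ∉ posA.keys := by rw [pv_keys_eq posA posB h]; exact hk
    have hA : posA.get? w = none := (PySem.Dict.get?_eq_none_iff_not_mem_keys _ _).2 hkA
    rw [PySem.Dict.getD_eq_get?_getD, PySem.Dict.getD_eq_get?_getD, hA, hc]
    rfl
  | some ps =>
    have hmem : (w, ps) ∈ posB.items := PySem.Dict.mem_items_of_get?_eq_some _ hc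
    have hmemA : (w, pvGapEncode ps) ∈ posA.items := by
      rw [h]; exact List.mem_map.2 ⟨(w, ps), hmem, rfl⟩
    rw [PySem.Dict.getD_of_mem_items _ hmemA hndA,
        PySem.Dict.getD_of_get?_eq_some _ _ hc]

lemma pv_contains_nonempty (posB : PySem.Dict String (List Int)) (w : String)
    (hne : ∀ p ∈ posB.items, p.2 ≠ []) :
    posB.contains w = ((posB.getD w []).getLast?).isSome := by
  cases hc : posB.get? w with
  | none =>
    rw [PySem.Dict.contains_eq_isSome_get?, hc, PySem.Dict.getD_of_get?_eq_none _ _ hc]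
    rfl
  | some ps =>
    have hmem : (w, ps) ∈ posB.items := PySem.Dict.mem_items_of_get?_eq_some _ hc
    have hps : ps ≠ [] := hne _ hmem
    rw [PySem.Dict.contains_eq_isSome_get?, hc, PySem.Dict.getD_of_get?_eq_some _ _ hc]
    simp [List.getLast?_isSome, hps]

lemma pv_main (words : List String) (is : List Int) :
    ∀ (posA : PySem.Dict String (List Int)) (lastA : PySem.Dict String Int)
      (posB : PySem.Dict String (List Int)),
    posA.items = posB.items.map (fun p => (p.1, pvGapEncode p.2)) →
    (∀ w, lastA.get? w = (posB.getD w []).getLast?) →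
    posB.keys.Nodup →
    (∀ p ∈ posB.items, p.2 ≠ []) →
    (is.foldl (pvStepA words) (posA, lastA)).1.items
      = (is.foldl (pvStepB words) posB).items.map (fun p => (p.1, pvGapEncode p.2)) := by
  induction is with
  | nil => intro posA lastA posB h1 h2 h3 h4; simpa using h1
  | cons i is ih =>
    intro posA lastA posB h1 h2 h3 h4
    simp only [List.foldl_cons]
    cases hg : PySem.List.pyGet? words i with
    | none =>
      simp only [pvStepA, pvStepB, hg]
      exact ih posA lastA posB h1 h2 h3 h4
    | some w =>
      have hlc : lastA.contains w = posB.contains w := by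
        rw [PySem.Dict.contains_eq_isSome_get?, h2 w,
            pv_contains_nonempty posB w h4]
      cases hc : posB.contains w with
      | false =>
        -- w is new: both record absolute position i
        have hB0 : posB.getD w [] = [] := PySem.Dict.getD_of_not_contains _ _ hc
        have hA0 : posA.getD w [] = [] := by
          rw [pv_getD_transfer posA posB w h1 h3, hB0]; rfl
        simp only [pvStepA, pvStepB, hg, hlc, hc]
        rw [if_pos trivial]
        apply ih
        · -- items
          have hcA : posA.contains w = false := by
            rw [PySem.Dict.contains_eq_decide_mem_keys, pv_keys_eq posA posB h1,
                ← PySem.Dict.contains_eq_decide_mem_keys, hc]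
          rw [PySem.Dict.items_insert_of_not_contains _ _ hcA,
              PySem.Dict.items_insert_of_not_contains _ _ hc, h1, hA0, hB0]
          simp [pvGapEncode]
        · -- last positions
          intro w'
          by_cases hw : w' = w
          · subst hw
            rw [PySem.Dict.get?_insert_self, PySem.Dict.getD_insert_self, hB0]
            simp
          · rw [PySem.Dict.get?_insert_of_ne _ _ hw, PySem.Dict.getD_insert_of_ne _ _ _ hw]
            exact h2 w'
        · exact PySem.Dict.nodup_keys_insert _ _ _ h3
        · intro p hp
          rcases (PySem.Dict.mem_items_insert _ _ _ _).1 hp with hp | ⟨hp, _⟩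
          · subst hp; simp
          · exact h4 p hp
      | true =>
        -- w already seen: A appends the gap, B appends the absolute position
        have hB : posB.getD w [] ≠ [] := by
          intro h0
          have := pv_contains_nonempty posB w h4
          rw [hc, h0] at this
          simp at this
        have hlast : lastA.getD w 0 = (posB.getD w []).getLast?.getD 0 := by
          rw [PySem.Dict.getD_eq_get?_getD, h2 w]
        have hval : posA.getD w [] ++ [i - lastA.getD w 0]
            = pvGapEncode (posB.getD w [] ++ [i]) := by
          rw [pvGapEncode_append _ _ hB, pv_getD_transfer posA posB w h1 h3, hlast]
        simp only [pvStepA, pvStepB, hg, hlc, hc]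
        rw [if_neg (by simp : ¬(true = false))]
        apply ih
        · -- items: overwrite in place on both sides
          have hcA : posA.contains w = true := by
            rw [PySem.Dict.contains_eq_decide_mem_keys, pv_keys_eq posA posB h1,
                ← PySem.Dict.contains_eq_decide_mem_keys, hc]
          rw [PySem.Dict.items_insert_of_contains _ _ hcA,
              PySem.Dict.items_insert_of_contains _ _ hc, h1, List.map_map, List.map_map]
          apply List.map_congr_left
          intro p _
          by_cases hw : p.1 = w
          · simp [Function.comp, hw, hval]
          · simp [Function.comp, hw]
        · intro w'
          by_cases hw : w' = w
          · subst hw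
            rw [PySem.Dict.get?_insert_self, PySem.Dict.getD_insert_self]
            simp
          · rw [PySem.Dict.get?_insert_of_ne _ _ hw, PySem.Dict.getD_insert_of_ne _ _ _ hw]
            exact h2 w'
        · exact PySem.Dict.nodup_keys_insert _ _ _ h3
        · intro p hp
          rcases (PySem.Dict.mem_items_insert _ _ _ _).1 hp with hp | ⟨hp, _⟩
          · subst hp; simp
          · exact h4 p hp

-- ===== VERDICT (by name: the statement is the Claim_ definition above) =====
theorem generate_positional_indexes_from_list_spec : Claim_equal_generate_positional_indexes_from_list := by
  intro words start_index _ _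
  unfold Spec_generate_positional_indexes_from_list
  unfold generate_positional_indexes_from_list generate_positional_indexes_from_list_alt
  exact pv_main words _ PySem.Dict.empty PySem.Dict.empty PySem.Dict.empty
    rfl (fun _ => rfl) (PySem.Dict.nodup_keys_empty) (fun p hp => by cases hp)
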